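-- pv_equiv track=rewrite | github.com/Revess/Creative-System-Design-Assignments-Year-2 | blok2a/sequencerV2.py | convertToStamps
-- ===== SOURCE A (Python) =====
-- def convertToStamps(lst):
--     stamps = []
--     ms_lst = lst
--     p = 0
--     x = 0
--     for i in ms_lst:                            #Convert the milisecond list to a timestamp list by adding them together in seperate spaces
--         if i == 0:
--             stamps.append(i)
--             p += 1
--         else:
--             x += i
--             stamps.append(x)
--             p += 1
--     return stamps
-- ===== SOURCE B (Python) =====
-- def convertToStamps(lst):
--     prefix = []
--     total = 0
--     for v in lst:
--         total += v
--         prefix.append(total)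
--     return [v if v == 0 else s for v, s in zip(lst, prefix)]
-- ===== Notes on version B (the rewrite author's own statement) =====
-- stated objective: simpler
-- what changed: Replaces the conditional accumulator-and-append loop by an unconditional prefix-sum pass followed by a zip comprehension that keeps the original element at zero positions (zeros add nothing to the running sum, so the prefix sum equals A's accumulator at every non-zero position).
import Mathlib
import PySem

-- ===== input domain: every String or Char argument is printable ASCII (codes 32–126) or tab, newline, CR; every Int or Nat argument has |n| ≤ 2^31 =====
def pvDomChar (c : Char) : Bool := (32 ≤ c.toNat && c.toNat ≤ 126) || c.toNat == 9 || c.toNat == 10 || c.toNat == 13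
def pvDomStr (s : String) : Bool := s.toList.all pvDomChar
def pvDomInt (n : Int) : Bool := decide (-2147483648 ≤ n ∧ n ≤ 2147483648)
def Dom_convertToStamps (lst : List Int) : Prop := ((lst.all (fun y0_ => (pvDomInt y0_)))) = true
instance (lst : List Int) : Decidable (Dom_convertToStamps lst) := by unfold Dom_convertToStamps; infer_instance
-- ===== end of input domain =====

-- B replaces A's conditional accumulator loop by an unconditional prefix-sum pass plus a zip comprehension (simpler decomposition, same cost).


-- ===== PORT A =====
-- Port of A: one pass keeping (stamps, x); zeros are appended as-is, non-zeros extend the accumulator.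
def convertToStamps (lst : List Int) : List Int :=
  (lst.foldl (fun (st : List Int × Int) i =>
      if i = 0 then (st.1 ++ [i], st.2)
      else (st.1 ++ [st.2 + i], st.2 + i)) ([], 0)).1

-- ===== PORT B =====
-- Port of B: prefix sums in one pass, then a zip comprehension.
def pvPrefix (total : Int) : List Int → List Int
  | [] => []
  | v :: rest => (total + v) :: pvPrefix (total + v) rest

def convertToStamps_alt (lst : List Int) : List Int :=
  (lst.zip (pvPrefix 0 lst)).map (fun p => if p.1 = 0 then p.1 else p.2)

-- ===== PRECONDITION & SPEC =====
def Spec_convertToStamps (lst : List Int) (out : List Int) : Prop := out = convertToStamps_alt lst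
instance (lst : List Int) (out : List Int) : Decidable (Spec_convertToStamps lst out) := by unfold Spec_convertToStamps; infer_instance

-- ===== CLAIM (what is proved, stated in full; the proofs are below) =====
def Claim_equal_convertToStamps : Prop := ∀ (lst : List Int), Dom_convertToStamps lst → Spec_convertToStamps lst (convertToStamps lst)

-- ===== LEMMAS AND PROOFS =====
lemma foldA_eq (l : List Int) : ∀ (stamps : List Int) (x : Int),
    (l.foldl (fun (st : List Int × Int) i =>
      if i = 0 then (st.1 ++ [i], st.2)
      else (st.1 ++ [st.2 + i], st.2 + i)) (stamps, x)).1
    = stamps ++ (l.zip (pvPrefix x l)).map (fun p => if p.1 = 0 then p.1 else p.2) := by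
  induction l with
  | nil => intro stamps x; simp
  | cons i rest ih =>
    intro stamps x
    by_cases h : i = 0
    · subst h
      simp [List.foldl, pvPrefix, ih, List.append_assoc]
    · simp [List.foldl, pvPrefix, h, ih, List.append_assoc]

-- ===== VERDICT (by name: the statement is the Claim_ definition above) =====
theorem convertToStamps_spec : Claim_equal_convertToStamps := by
  intro lst _
  show convertToStamps lst = convertToStamps_alt lst
  simp [convertToStamps, convertToStamps_alt, foldA_eq]
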